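-- pv_equiv track=rewrite | github.com/js51/Circular-genome-tools | cgt/parsers.py | __split_into_children
-- ===== SOURCE A (Python) =====
-- def __split_into_children(children_string):
--     """Helper function for splitting a newick string into siblings"""
--     string = children_string
--     opened = 0
--     closed = 0
--     pieces = []
--     last_stop = 0
--     for i, s in enumerate(string):
--         if s == "(":
--             opened += 1
--         if s == ")":
--             closed += 1
--         if s == "," and opened == closed:
--             pieces.append(string[last_stop:i])
--             last_stop = i + 1
--     pieces.append(string[last_stop:])
--     return pieces
-- ===== SOURCE B (Python) =====
-- def __split_into_children(children_string):
--     """Split a newick string into top-level siblings: split on every comma,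
--     then merge fragments back together until parentheses balance."""
--     pieces = []
--     buf = None
--     opened = 0
--     closed = 0
--     for frag in children_string.split(','):
--         merged = frag if buf is None else buf + ',' + frag
--         opened += frag.count('(')
--         closed += frag.count(')')
--         if opened == closed:
--             pieces.append(merged)
--             buf = None
--         else:
--             buf = merged
--     if buf is not None:
--         pieces.append(buf)
--     return pieces
-- ===== Notes on version B (the rewrite author's own statement) =====
-- stated objective: alternative
-- what changed: A does one index-tracking character scan that records slice boundaries at balanced top-level commas; B instead splits the string on every comma up front and then merges the resulting fragments back together with running '('/')' counts, emitting a merged buffer each time the counts balance and flushing any leftover buffer at the end.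
import Mathlib
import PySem

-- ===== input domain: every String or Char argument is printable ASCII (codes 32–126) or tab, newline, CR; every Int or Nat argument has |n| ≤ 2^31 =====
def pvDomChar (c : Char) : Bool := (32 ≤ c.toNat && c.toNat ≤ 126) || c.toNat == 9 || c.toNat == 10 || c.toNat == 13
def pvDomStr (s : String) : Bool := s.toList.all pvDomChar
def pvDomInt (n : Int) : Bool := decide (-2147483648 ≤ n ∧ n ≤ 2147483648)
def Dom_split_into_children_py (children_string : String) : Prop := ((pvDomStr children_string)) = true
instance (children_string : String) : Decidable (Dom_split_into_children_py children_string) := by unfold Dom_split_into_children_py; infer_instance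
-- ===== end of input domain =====

-- B replaces A's single index-tracking scan (slice boundaries at balanced commas) by
-- split-on-comma followed by merging fragments under running parenthesis counts (objective: alternative).

-- ===== PORT A =====
-- loop body of A's 'for i, s in enumerate(string)' scan
def pvAStep (string : List Char) (acc : Int × Int × List String × Int) (p : Int × Char) :
    Int × Int × List String × Int :=
  let opened := if p.2 = '(' then acc.1 + 1 else acc.1
  let closed := if p.2 = ')' then acc.2.1 + 1 else acc.2.1
  if p.2 = ',' ∧ opened = closed then
    (opened, closed, acc.2.2.1 ++ [String.mk (PySem.List.slice string (some acc.2.2.2) (some p.1))], p.1 + 1)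
  else (opened, closed, acc.2.2.1, acc.2.2.2)

def split_into_children_py (children_string : String) : List String :=
  let string := children_string.toList
  let st := (PySem.List.enumerate string).foldl (pvAStep string) (0, 0, [], 0)
  st.2.2.1 ++ [String.mk (PySem.List.slice string (some st.2.2.2) none)]

-- ===== PORT B =====
-- loop body of B's 'for frag in children_string.split(',')' merge loop
def pvBStep (acc : List String × Option (List Char) × Int × Int) (frag : List Char) :
    List String × Option (List Char) × Int × Int :=
  let merged := match acc.2.1 with | none => frag | some b => b ++ ',' :: frag
  let opened := acc.2.2.1 + (frag.count '(' : Int)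
  let closed := acc.2.2.2 + (frag.count ')' : Int)
  if opened = closed then (acc.1 ++ [String.mk merged], none, opened, closed)
  else (acc.1, some merged, opened, closed)

def split_into_children_py_alt (children_string : String) : List String :=
  let st := (children_string.toList.splitOn ',').foldl pvBStep ([], none, 0, 0)
  match st.2.1 with
  | none => st.1
  | some b => st.1 ++ [String.mk b]

-- ===== PRECONDITION & SPEC =====
def Spec_split_into_children_py (children_string : String) (out : List String) : Prop := out = split_into_children_py_alt children_string
instance (children_string : String) (out : List String) : Decidable (Spec_split_into_children_py children_string out) := by unfold Spec_split_into_children_py; infer_instance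

-- ===== CLAIM (what is proved, stated in full; the proofs are below) =====
def Claim_equal_split_into_children_py : Prop := ∀ (children_string : String), Dom_split_into_children_py children_string → Spec_split_into_children_py children_string (split_into_children_py children_string)

-- ===== LEMMAS AND PROOFS =====

-- common reference scan: process chars, emit the buffer at each balanced top-level comma,
-- always emit the final buffer
def pvGo : List Char → Int → Int → List Char → List (List Char)
  | [], _, _, buf => [buf]
  | ch :: rest, o, c, buf =>
    let o' := if ch = '(' then o + 1 else o
    let c' := if ch = ')' then c + 1 else c
    if ch = ',' ∧ o' = c' then buf :: pvGo rest o' c' []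
    else pvGo rest o' c' (buf ++ [ch])

-- ---------- A-side ----------

lemma pvA_loop (L : List Char) (suffix : List Char) :
    ∀ (j ls : Nat) (o c : Int) (pieces : List String), L.drop j = suffix → ls ≤ j →
    (let st := (PySem.List.enumerate suffix (j : Int)).foldl (pvAStep L) (o, c, pieces, (ls : Int))
     st.2.2.1 ++ [String.mk (PySem.List.slice L (some st.2.2.2) none)])
    = pieces ++ (pvGo suffix o c ((L.drop ls).take (j - ls))).map String.mk := by
  induction suffix with
  | nil =>
    intro j ls o c pieces hdrop hle
    have hlen : L.length ≤ j := by
      by_contra h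
      push_neg at h
      have := List.drop_eq_nil_iff.mp hdrop
      omega
    have htake : (L.drop ls).take (j - ls) = L.drop ls := by
      apply List.take_of_length_le
      simp
      omega
    simp only [PySem.List.enumerate_nil, List.foldl_nil, pvGo, htake]
    rw [PySem.List.slice_from_natCast]
    simp
  | cons ch rest ih =>
    intro j ls o c pieces hdrop hle
    have hjlt : j < L.length := by
      by_contra h
      push_neg at h
      rw [List.drop_eq_nil_of_le h] at hdrop
      exact List.cons_ne_nil _ _ hdrop.symm
    have hget : L[j]? = some ch := by
      rw [← List.head?_drop, hdrop, List.head?_cons]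
    have hrest : L.drop (j + 1) = rest := by
      rw [← List.tail_drop, hdrop, List.tail_cons]
    rw [PySem.List.enumerate_cons, List.foldl_cons]
    by_cases hcond : ch = ',' ∧ (if ch = '(' then o + 1 else o) = (if ch = ')' then c + 1 else c)
    · -- balanced top-level comma: emit a piece
      have hstep : pvAStep L (o, c, pieces, (ls : Int)) ((j : Int), ch)
          = ((if ch = '(' then o + 1 else o), (if ch = ')' then c + 1 else c),
             pieces ++ [String.mk (PySem.List.slice L (some (ls : Int)) (some (j : Int)))],
             (j : Int) + 1) := by
        simp only [pvAStep]
        rw [if_pos hcond]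
      rw [hstep]
      have hcast : ((j : Int) + 1) = (((j + 1 : Nat)) : Int) := by push_cast; ring
      rw [hcast, ih (j + 1) (j + 1) _ _ _ hrest (le_refl _)]
      rw [PySem.List.slice_natCast]
      conv_rhs => rw [pvGo]
      rw [if_pos hcond]
      simp
    · -- ordinary character: it joins the current piece
      have hstep : pvAStep L (o, c, pieces, (ls : Int)) ((j : Int), ch)
          = ((if ch = '(' then o + 1 else o), (if ch = ')' then c + 1 else c), pieces, (ls : Int)) := by
        simp only [pvAStep]
        rw [if_neg hcond]
      rw [hstep]
      have hcast : ((j : Int) + 1) = (((j + 1 : Nat)) : Int) := by push_cast; ring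
      rw [hcast, ih (j + 1) ls _ _ _ hrest (by omega)]
      have hbuf : (L.drop ls).take (j + 1 - ls) = (L.drop ls).take (j - ls) ++ [ch] := by
        have h1 : j + 1 - ls = (j - ls) + 1 := by omega
        have h2 : (L.drop ls)[j - ls]? = some ch := by
          rw [List.getElem?_drop]
          have h3 : ls + (j - ls) = j := by omega
          rw [h3, hget]
        rw [h1, List.take_succ, h2]
        rfl
      rw [hbuf]
      conv_rhs => rw [pvGo]
      rw [if_neg hcond]

lemma pvA_eq (s : String) :
    split_into_children_py s = (pvGo s.toList 0 0 []).map String.mk := by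
  have h := pvA_loop s.toList s.toList 0 0 0 0 [] (by simp) (le_refl 0)
  simp only [Nat.cast_zero, Nat.sub_zero, List.drop_zero, List.take_zero] at h
  simpa [split_into_children_py] using h

-- ---------- B-side ----------

-- the buffer pvBStep carries, as pvGo sees it: pending text plus the unemitted comma
def pvToBuf : Option (List Char) → List Char
  | none => []
  | some b => b ++ [',']

def pvBRun (fs : List (List Char)) (pieces : List String) (buf : Option (List Char)) (o c : Int) :
    List String :=
  let st := fs.foldl pvBStep (pieces, buf, o, c)
  match st.2.1 with
  | none => st.1
  | some b => st.1 ++ [String.mk b]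

lemma pvGo_append_of_not_mem (f : List Char) (h : ',' ∉ f) :
    ∀ (rest : List Char) (o c : Int) (buf : List Char),
    pvGo (f ++ rest) o c buf
      = pvGo rest (o + (f.count '(' : Int)) (c + (f.count ')' : Int)) (buf ++ f) := by
  induction f with
  | nil => intro rest o c buf; simp
  | cons x f' ih =>
    intro rest o c buf
    have hx : x ≠ ',' := fun hx => h (hx ▸ List.mem_cons_self)
    have hf' : ',' ∉ f' := fun hm => h (List.mem_cons_of_mem _ hm)
    rw [List.cons_append, pvGo]
    rw [if_neg (fun hc => hx hc.1)]
    rw [ih hf' rest _ _ (buf ++ [x])]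
    have ho : (if x = '(' then o + 1 else o) + (f'.count '(' : Int)
        = o + ((x :: f').count '(' : Int) := by
      rw [List.count_cons]
      by_cases hxo : x = '(' <;> simp [hxo] <;> push_cast <;> ring
    have hc : (if x = ')' then c + 1 else c) + (f'.count ')' : Int)
        = c + ((x :: f').count ')' : Int) := by
      rw [List.count_cons]
      by_cases hxc : x = ')' <;> simp [hxc] <;> push_cast <;> ring
    have hb : (buf ++ [x]) ++ f' = buf ++ x :: f' := by simp
    rw [ho, hc, hb]

lemma pvGo_single (f : List Char) (h : ',' ∉ f) (o c : Int) (buf : List Char) :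
    pvGo f o c buf = [buf ++ f] := by
  have h2 := pvGo_append_of_not_mem f h [] o c buf
  simpa [pvGo] using h2

lemma pvIntercalate_singleton (sep a : List Char) : sep.intercalate [a] = a := by
  simp [List.intercalate]

lemma pvIntercalate_cons_cons (sep a b : List Char) (l : List (List Char)) :
    sep.intercalate (a :: b :: l) = a ++ sep ++ sep.intercalate (b :: l) := by
  simp [List.intercalate, List.intersperse]

lemma pvMerged_eq (buf : Option (List Char)) (f : List Char) :
    (match buf with | none => f | some b => b ++ ',' :: f) = pvToBuf buf ++ f := by
  cases buf <;> simp [pvToBuf]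

lemma pvB_loop :
    ∀ (fs : List (List Char)) (f : List Char) (pieces : List String)
      (buf : Option (List Char)) (o c : Int), (∀ g ∈ f :: fs, ',' ∉ g) →
    pvBRun (f :: fs) pieces buf o c
      = pieces ++ (pvGo ([','].intercalate (f :: fs)) o c (pvToBuf buf)).map String.mk := by
  intro fs
  induction fs with
  | nil =>
    intro f pieces buf o c hfree
    have hf : ',' ∉ f := hfree f List.mem_cons_self
    rw [pvIntercalate_singleton, pvGo_single f hf]
    simp only [pvBRun, List.foldl_cons, List.foldl_nil, pvBStep, pvMerged_eq]
    by_cases hb : o + (f.count '(' : Int) = c + (f.count ')' : Int)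
    · rw [if_pos hb]
      simp
    · rw [if_neg hb]
      simp
  | cons f2 fs' ih =>
    intro f pieces buf o c hfree
    have hf : ',' ∉ f := hfree f List.mem_cons_self
    have hrest : ∀ g ∈ f2 :: fs', ',' ∉ g := fun g hg => hfree g (List.mem_cons_of_mem _ hg)
    have hcomma1 : (',' : Char) ≠ '(' := by decide
    have hcomma2 : (',' : Char) ≠ ')' := by decide
    rw [pvIntercalate_cons_cons, List.append_assoc, List.singleton_append,
        pvGo_append_of_not_mem f hf]
    conv_rhs => rw [pvGo]
    simp only [if_neg hcomma1, if_neg hcomma2]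
    by_cases hb : o + (f.count '(' : Int) = c + (f.count ')' : Int)
    · -- balance reached: B emits the merged buffer, pvGo emits at the comma
      rw [if_pos ⟨trivial, hb⟩]
      have hstep : pvBStep (pieces, buf, o, c) f
          = (pieces ++ [String.mk (pvToBuf buf ++ f)], none,
             o + (f.count '(' : Int), c + (f.count ')' : Int)) := by
        simp only [pvBStep, pvMerged_eq]
        rw [if_pos hb]
      have hL : pvBRun (f :: f2 :: fs') pieces buf o c
          = pvBRun (f2 :: fs') (pieces ++ [String.mk (pvToBuf buf ++ f)]) none
              (o + (f.count '(' : Int)) (c + (f.count ')' : Int)) := by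
        simp only [pvBRun, List.foldl_cons, hstep]
      rw [hL, ih _ _ _ _ _ hrest]
      simp [pvToBuf]
    · -- still unbalanced: B keeps the merged buffer, pvGo keeps the comma in the buffer
      rw [if_neg (fun hcc => hb hcc.2)]
      have hstep : pvBStep (pieces, buf, o, c) f
          = (pieces, some (pvToBuf buf ++ f),
             o + (f.count '(' : Int), c + (f.count ')' : Int)) := by
        simp only [pvBStep, pvMerged_eq]
        rw [if_neg hb]
      have hL : pvBRun (f :: f2 :: fs') pieces buf o c
          = pvBRun (f2 :: fs') pieces (some (pvToBuf buf ++ f))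
              (o + (f.count '(' : Int)) (c + (f.count ')' : Int)) := by
        simp only [pvBRun, List.foldl_cons, hstep]
      rw [hL, ih _ _ _ _ _ hrest]
      simp [pvToBuf]

lemma pv_splitOn_comma_free : ∀ (xs : List Char) (f : List Char), f ∈ xs.splitOn ',' → ',' ∉ f := by
  intro xs
  induction xs with
  | nil =>
    intro f hf
    rw [List.splitOn_nil] at hf
    simp at hf
    simp [hf]
  | cons x xs ih =>
    intro f hf
    unfold List.splitOn at hf ih
    rw [List.splitOnP_cons] at hf
    by_cases hx : x = ','
    · simp only [hx, beq_self_eq_true, if_true] at hf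
      rcases List.mem_cons.mp hf with h1 | h2
      · simp [h1]
      · exact ih f h2
    · simp only [beq_eq_false_iff_ne.mpr hx, if_false] at hf
      obtain ⟨g, gs, hgs⟩ := List.exists_cons_of_ne_nil (List.splitOnP_ne_nil _ xs)
      rw [hgs, List.modifyHead_cons] at hf
      rcases List.mem_cons.mp hf with h1 | h2
      · subst h1
        intro hmem
        rcases List.mem_cons.mp hmem with h3 | h4
        · exact hx h3.symm
        · exact ih g (hgs ▸ List.mem_cons_self) h4
      · exact ih f (hgs ▸ List.mem_cons_of_mem _ h2)

lemma pvB_eq (s : String) :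
    split_into_children_py_alt s = (pvGo s.toList 0 0 []).map String.mk := by
  have hne : s.toList.splitOn ',' ≠ [] := by
    unfold List.splitOn
    exact List.splitOnP_ne_nil _ _
  obtain ⟨f, fs, hsplit⟩ := List.exists_cons_of_ne_nil hne
  have halt : split_into_children_py_alt s = pvBRun (s.toList.splitOn ',') [] none 0 0 := rfl
  rw [halt, hsplit,
      pvB_loop fs f [] none 0 0
        (fun g hg => pv_splitOn_comma_free s.toList g (hsplit ▸ hg)),
      ← hsplit, List.intercalate_splitOn]
  simp [pvToBuf]

-- ===== VERDICT (by name: the statement is the Claim_ definition above) =====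
theorem split_into_children_py_spec : Claim_equal_split_into_children_py := by
  intro s _h
  unfold Spec_split_into_children_py
  rw [pvA_eq, pvB_eq]
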